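-- pv_equiv track=rewrite | github.com/ioki-smore/spectrum | core/manager.py | _find_anomaly_intervals
-- ===== SOURCE A (Python) =====
-- from typing import Any, Dict, List, Optional
--
-- def _find_anomaly_intervals(df, anomalies, scores) -> List[Dict]:
--     """
--     Finds continuous anomaly segments.
--     Returns list of dicts: {'start_idx': int, 'end_idx': int} (indices into scores array)
--     """
--     events = []
--     in_event = False
--     start_idx = 0
--
--     for i, is_anom in enumerate(anomalies):
--         if is_anom and not in_event:
--             in_event = True
--             start_idx = i
--         elif not is_anom and in_event:
--             in_event = False
--             events.append({'start_idx': start_idx, 'end_idx': i - 1})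
--
--     if in_event:
--         events.append({'start_idx': start_idx, 'end_idx': len(anomalies) - 1})
--
--     return events
-- ===== SOURCE B (Python) =====
-- def _find_anomaly_intervals(df, anomalies, scores):
--     """Run-grouping pass: advance over each maximal run of equal truthiness at once;
--     emit one interval per truthy run. No in_event flag or transition branches."""
--     events = []
--     i = 0
--     n = len(anomalies)
--     while i < n:
--         b = bool(anomalies[i])
--         j = i + 1
--         while j < n and bool(anomalies[j]) == b:
--             j += 1
--         if b:
--             events.append({'start_idx': i, 'end_idx': j - 1})
--         i = j
--     return events
-- ===== Notes on version B (the rewrite author's own statement) =====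
-- stated objective: alternative
-- what changed: Replaced the edge-detecting state machine (in_event flag, transition branches, trailing close) with a run-grouping pass that consumes each maximal run of equal truthiness at once and emits one interval per truthy run.
import Mathlib
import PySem

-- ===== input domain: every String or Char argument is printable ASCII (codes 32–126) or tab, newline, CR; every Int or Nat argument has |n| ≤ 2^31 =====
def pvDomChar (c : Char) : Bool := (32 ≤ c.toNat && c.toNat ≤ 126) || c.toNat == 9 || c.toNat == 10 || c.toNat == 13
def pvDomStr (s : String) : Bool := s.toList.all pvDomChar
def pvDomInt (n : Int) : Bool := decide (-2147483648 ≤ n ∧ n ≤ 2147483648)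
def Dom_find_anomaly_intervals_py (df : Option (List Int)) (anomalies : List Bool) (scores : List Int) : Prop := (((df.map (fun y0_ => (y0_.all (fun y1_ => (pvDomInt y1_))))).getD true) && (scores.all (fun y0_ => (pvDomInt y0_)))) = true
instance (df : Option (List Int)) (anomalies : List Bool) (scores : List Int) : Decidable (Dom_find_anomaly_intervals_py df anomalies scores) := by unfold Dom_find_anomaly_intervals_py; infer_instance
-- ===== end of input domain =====

-- B replaces A's edge-detecting in_event state machine by a run-grouping pass over maximal runs of equal truthiness (alternative decomposition, same cost).
-- ===== PORT A =====
-- The for-loop of A as structural recursion over the same state (events, in_event, start_idx),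
-- carrying the index i; the base case is the trailing 'if in_event' with i = len(anomalies).
def aGo (l : List Bool) (i : Int) (events : List (List (String × Int))) (in_event : Bool) (start_idx : Int) : List (List (String × Int)) :=
  match l with
  | [] =>
    if in_event then events ++ [[("start_idx", start_idx), ("end_idx", i - 1)]] else events
  | is_anom :: rest =>
    if is_anom && !in_event then
      aGo rest (i + 1) events true i
    else if !is_anom && in_event then
      aGo rest (i + 1) (events ++ [[("start_idx", start_idx), ("end_idx", i - 1)]]) false start_idx
    else
      aGo rest (i + 1) events in_event start_idx

def find_anomaly_intervals_py (df : Option (List Int)) (anomalies : List Bool) (scores : List Int) : List (List (String × Int)) :=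
  aGo anomalies 0 [] false 0

-- ===== PORT B =====
-- B's outer while-loop: each step consumes one maximal run of equal truthiness
-- (head plus takeWhile of the tail) and emits one interval if the run is truthy.
def altGo (l : List Bool) (pos : Int) : List (List (String × Int)) :=
  match l with
  | [] => []
  | b :: rest =>
    let runLen : Int := 1 + (rest.takeWhile (· == b)).length
    (if b then [[("start_idx", pos), ("end_idx", pos + runLen - 1)]] else []) ++
      altGo (rest.dropWhile (· == b)) (pos + runLen)
termination_by l.length
decreasing_by simpa using Nat.lt_succ_of_le (List.length_dropWhile_le (· == b) rest)

def find_anomaly_intervals_py_alt (df : Option (List Int)) (anomalies : List Bool) (scores : List Int) : List (List (String × Int)) :=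
  altGo anomalies 0

-- ===== PRECONDITION & SPEC =====
def Spec_find_anomaly_intervals_py (df : Option (List Int)) (anomalies : List Bool) (scores : List Int) (out : List (List (String × Int))) : Prop := out = find_anomaly_intervals_py_alt df anomalies scores
instance (df : Option (List Int)) (anomalies : List Bool) (scores : List Int) (out : List (List (String × Int))) : Decidable (Spec_find_anomaly_intervals_py df anomalies scores out) := by unfold Spec_find_anomaly_intervals_py; infer_instance

-- ===== CLAIM (what is proved, stated in full; the proofs are below) =====
def Claim_equal_find_anomaly_intervals_py : Prop := ∀ (df : Option (List Int)) (anomalies : List Bool) (scores : List Int), Dom_find_anomaly_intervals_py df anomalies scores → Spec_find_anomaly_intervals_py df anomalies scores (find_anomaly_intervals_py df anomalies scores)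

-- ===== LEMMAS AND PROOFS =====

-- Skipping a leading false costs nothing: altGo ignores false runs.
theorem altGo_false_cons (rest : List Bool) (i : Int) :
    altGo (false :: rest) i = altGo rest (i + 1) := by
  cases rest with
  | nil => simp [altGo]
  | cons b rest2 =>
    cases b with
    | false =>
      rw [altGo, altGo]
      simp only [List.takeWhile, List.dropWhile]
      norm_num
      ring_nf
    | true =>
      rw [altGo]
      simp [List.takeWhile, List.dropWhile]

-- The joint loop invariant: aGo from state (false, _) produces events ++ altGo,
-- and from state (true, start) it first closes the open run then continues.
theorem aGo_eq (l : List Bool) : ∀ (i : Int) (ev : List (List (String × Int))) (s : Int),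
    aGo l i ev false s = ev ++ altGo l i ∧
    aGo l i ev true s = ev ++ [[("start_idx", s), ("end_idx", i + ((l.takeWhile (· == true)).length : Int) - 1)]]
      ++ altGo (l.dropWhile (· == true)) (i + ((l.takeWhile (· == true)).length : Int)) := by
  induction l with
  | nil => intro i ev s; simp [aGo, altGo]
  | cons b rest ih =>
    intro i ev s
    cases b with
    | false =>
      constructor
      · show aGo rest (i + 1) ev false s = _
        rw [(ih (i + 1) ev s).1, altGo_false_cons]
      · show aGo rest (i + 1) (ev ++ [[("start_idx", s), ("end_idx", i - 1)]]) false s = _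
        rw [(ih (i + 1) _ s).1]
        simp [altGo_false_cons]
    | true =>
      constructor
      · show aGo rest (i + 1) ev true i = _
        rw [(ih (i + 1) ev i).2, altGo]
        simp only [List.takeWhile_cons, List.dropWhile_cons, List.append_assoc,
          List.cons_append, List.nil_append, beq_self_eq_true, if_true, List.length_cons]
        norm_num
        ring_nf
        exact ⟨trivial, trivial⟩
      · show aGo rest (i + 1) ev true s = _
        rw [(ih (i + 1) ev s).2]
        simp only [List.takeWhile_cons, List.dropWhile_cons, beq_self_eq_true, if_true,
          List.length_cons]
        norm_num
        ring_nf
        exact ⟨trivial, trivial⟩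

-- ===== VERDICT (by name: the statement is the Claim_ definition above) =====
theorem find_anomaly_intervals_py_spec : Claim_equal_find_anomaly_intervals_py := by
  intro df anomalies scores _
  show find_anomaly_intervals_py df anomalies scores = find_anomaly_intervals_py_alt df anomalies scores
  simpa [find_anomaly_intervals_py, find_anomaly_intervals_py_alt] using (aGo_eq anomalies 0 [] 0).1
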